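-- pv_equiv track=rewrite | github.com/olalha/Quizzer | text_processing/batch_splitter.py | get_batch_word_counts
-- ===== SOURCE A (Python) =====
-- def get_batch_word_counts(text: dict, batch_starts: list) -> list:
--     """
--     Calculates the word count for each batch created by split_pages_into_batches.
--
--     Args:
--         text (dict): Dictionary of page numbers to page text.
--         batch_starts (list): List of page numbers indicating the starting page of each batch.
--
--     Returns:
--         list: An array displaying the word count for each batch.
--     """
--
--     # Pre-calculate word counts for each page
--     word_counts = {page: len(text.split()) for page, text in text.items()}
--
--     batch_word_counts = []
--     sorted_pages = sorted(text.keys())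
--
--     # Iterate through batch start pages
--     for i, start_page in enumerate(batch_starts):
--
--         # Determine the end page for the current batch
--         end_page = batch_starts[i + 1] if i + 1 < len(batch_starts) else None
--
--         # Calculate the word count for the current batch
--         batch_word_count = 0
--         for page_num in sorted_pages:
--             if page_num >= start_page and (end_page is None or page_num < end_page):
--                 batch_word_count += word_counts[page_num]
--
--         batch_word_counts.append(batch_word_count)
--
--     return batch_word_counts
-- ===== SOURCE B (Python) =====
-- def get_batch_word_counts(text: dict, batch_starts: list) -> list:
--     """Prefix sums over the sorted pages + binary search per batch boundary."""
--     pages = sorted(text)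
--     prefix = [0]
--     for p in pages:
--         prefix.append(prefix[-1] + len(text[p].split()))
--     n = len(pages)
--
--     # standard bisect_left (the bisect module is not imported by the original module)
--     def bisect_left(x):
--         lo, hi = 0, n
--         while lo < hi:
--             mid = (lo + hi) // 2
--             if pages[mid] < x:
--                 lo = mid + 1
--             else:
--                 hi = mid
--         return lo
--
--     result = []
--     for i, start in enumerate(batch_starts):
--         lo = bisect_left(start)
--         hi = n if i + 1 == len(batch_starts) else bisect_left(batch_starts[i + 1])
--         result.append(prefix[hi] - prefix[lo] if lo < hi else 0)
--     return result
-- ===== Notes on version B (the rewrite author's own statement) =====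
-- stated objective: faster
-- what changed: Replaces the per-batch linear rescan of all sorted pages by one prefix-sum array over the sorted pages plus a binary search (hand-written bisect_left, since the module imports nothing) per batch boundary, so each batch count is a difference of two prefix sums.
import Mathlib
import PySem

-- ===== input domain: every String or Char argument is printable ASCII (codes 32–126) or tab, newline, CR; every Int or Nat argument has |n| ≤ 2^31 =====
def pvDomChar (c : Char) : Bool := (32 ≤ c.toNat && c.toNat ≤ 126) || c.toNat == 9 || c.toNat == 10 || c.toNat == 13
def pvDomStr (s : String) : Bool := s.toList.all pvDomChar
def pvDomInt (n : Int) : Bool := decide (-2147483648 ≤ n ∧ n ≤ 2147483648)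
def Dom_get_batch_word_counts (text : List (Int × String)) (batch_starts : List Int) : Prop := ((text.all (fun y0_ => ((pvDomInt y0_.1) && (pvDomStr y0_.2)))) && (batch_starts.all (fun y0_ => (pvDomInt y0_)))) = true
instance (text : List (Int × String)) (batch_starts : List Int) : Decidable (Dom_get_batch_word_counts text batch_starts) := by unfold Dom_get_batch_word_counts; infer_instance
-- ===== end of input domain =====

-- B replaces A's per-batch rescan of all sorted pages by one prefix-sum array over the
-- sorted pages plus a binary search per batch boundary (objective: faster).

-- ===== PORT A =====
def get_batch_word_counts (text : List (Int × String)) (batch_starts : List Int) : List Int :=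
  let d := PySem.Dict.ofList text
  -- word_counts = {page: len(text.split()) for page, text in text.items()}
  let word_counts :=
    d.items.foldl (fun w pt => w.insert pt.1 ((PySem.Str.split₀ pt.2).length : Int)) PySem.Dict.empty
  -- sorted_pages = sorted(text.keys())
  let sorted_pages := PySem.List.sorted (PySem.Dict.keys d) (fun x => x)
  -- for i, start_page in enumerate(batch_starts): ...
  (PySem.List.enumerate batch_starts).foldl (fun acc ip =>
    -- end_page = batch_starts[i + 1] if i + 1 < len(batch_starts) else None
    let end_page : Option Int :=
      if ip.1 + 1 < (batch_starts.length : Int) then some (PySem.List.pyGetD batch_starts (ip.1 + 1) 0) else none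
    -- inner loop: sum word_counts[page_num] over sorted_pages under the range condition
    -- (word_counts[page_num] ported as getD _ 0: page_num is a key of text, so KeyError is impossible)
    let bwc := sorted_pages.foldl (fun s p =>
      if decide (ip.2 ≤ p) && end_page.all (fun e => decide (p < e))
      then s + word_counts.getD p 0 else s) 0
    acc ++ [bwc]) []

-- ===== PORT B =====
-- Source B's hand-written bisect_left is the standard-library algorithm verbatim, so it is
-- ported as its exact PySem model PySem.List.bisectLeft.
def get_batch_word_counts_alt (text : List (Int × String)) (batch_starts : List Int) : List Int :=
  let d := PySem.Dict.ofList text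
  -- pages = sorted(text)
  let pages := PySem.List.sorted (PySem.Dict.keys d) (fun x => x)
  -- prefix = [0]; for p in pages: prefix.append(prefix[-1] + len(text[p].split()))
  -- (prefix[-1] ported as getD (length-1) 0: prefix is never empty; text[p] as getD _ "": p is a key)
  let pref := pages.foldl (fun pr p =>
    pr ++ [pr.getD (pr.length - 1) 0 + ((PySem.Str.split₀ (d.getD p "")).length : Int)]) [0]
  let n := pages.length
  -- for i, start in enumerate(batch_starts): ...
  (PySem.List.enumerate batch_starts).foldl (fun acc ip =>
    let lo := PySem.List.bisectLeft pages ip.2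
    -- hi = n if i + 1 == len(batch_starts) else bisect_left(batch_starts[i+1])
    let hi := if ip.1 + 1 = (batch_starts.length : Int) then n
              else PySem.List.bisectLeft pages (PySem.List.pyGetD batch_starts (ip.1 + 1) 0)
    -- prefix[hi] / prefix[lo] ported as getD _ 0: lo, hi ≤ n < len(prefix)
    acc ++ [if lo < hi then pref.getD hi 0 - pref.getD lo 0 else 0]) []

-- ===== PRECONDITION & SPEC =====
def Spec_get_batch_word_counts (text : List (Int × String)) (batch_starts : List Int) (out : List Int) : Prop := out = get_batch_word_counts_alt text batch_starts
instance (text : List (Int × String)) (batch_starts : List Int) (out : List Int) : Decidable (Spec_get_batch_word_counts text batch_starts out) := by unfold Spec_get_batch_word_counts; infer_instance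

-- ===== CLAIM (what is proved, stated in full; the proofs are below) =====
def Claim_equal_get_batch_word_counts : Prop := ∀ (text : List (Int × String)) (batch_starts : List Int), Dom_get_batch_word_counts text batch_starts → Spec_get_batch_word_counts text batch_starts (get_batch_word_counts text batch_starts)

-- ===== LEMMAS AND PROOFS =====

-- If membership in p is, index-wise, the window [L, H), then filtering is drop∘take.
lemma pv_filter_eq_drop_take {p : Int → Bool} :
    ∀ (l : List Int) (L H : Nat), (∀ (j : Nat) (hj : j < l.length), p l[j] = decide (L ≤ j ∧ j < H)) →
    l.filter p = (l.take H).drop L := by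
  intro l
  induction l with
  | nil => intro L H _; simp
  | cons a t ih =>
    intro L H h
    have ha := h 0 (by simp)
    simp only [List.getElem_cons_zero] at ha
    have ht : ∀ (j : Nat) (hj : j < t.length), p t[j] = decide (L - 1 ≤ j ∧ j < H - 1) := by
      intro j hj
      have := h (j + 1) (by simp; omega)
      simp only [List.getElem_cons_succ] at this
      rw [this, decide_eq_decide]
      omega
    cases H with
    | zero =>
      have hfa : p a = false := by rw [ha, decide_eq_false_iff_not]; omega
      have := ih L 0 (by intro j hj; rw [ht j hj, decide_eq_decide]; omega)
      simp only [List.take_zero, List.drop_nil] at this ⊢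
      simp [hfa, this]
    | succ H' =>
      by_cases hL : L = 0
      · subst hL
        have hta : p a = true := by rw [ha, decide_eq_true_eq]; omega
        have := ih 0 H' (by intro j hj; rw [ht j hj, decide_eq_decide]; omega)
        simp only [List.drop_zero] at this ⊢
        simp [hta, this, List.take_succ_cons]
      · have hfa : p a = false := by rw [ha, decide_eq_false_iff_not]; omega
        have hrec := ih (L - 1) H' (by intro j hj; rw [ht j hj, decide_eq_decide]; omega)
        have hL' : L = (L - 1) + 1 := by omega
        simp only [List.filter_cons, hfa, Bool.false_eq_true, if_false, List.take_succ_cons]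
        rw [hrec, hL', List.drop_succ_cons]
        simp

-- Running partial sums (used only to characterise B's prefix-list fold).
def pvPartials (f : Int → Int) : Int → List Int → List Int
  | _, [] => []
  | c, p :: t => (c + f p) :: pvPartials f (c + f p) t

lemma pv_fold_eq_partials (f : Int → Int) :
    ∀ (l : List Int) (acc : List Int), acc ≠ [] →
      l.foldl (fun pr p => pr ++ [pr.getD (pr.length - 1) 0 + f p]) acc
        = acc ++ pvPartials f (acc.getD (acc.length - 1) 0) l := by
  intro l
  induction l with
  | nil => intro acc _; simp [pvPartials]
  | cons p t ih =>
    intro acc hacc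
    have hlast : (acc ++ [acc.getD (acc.length - 1) 0 + f p]).getD
        ((acc ++ [acc.getD (acc.length - 1) 0 + f p]).length - 1) 0
        = acc.getD (acc.length - 1) 0 + f p := by
      simp [List.getD_eq_getElem?_getD]
    simp only [List.foldl_cons]
    rw [ih (acc ++ [acc.getD (acc.length - 1) 0 + f p]) (by simp), hlast]
    simp [pvPartials, List.append_assoc]

lemma pv_partials_getD (f : Int → Int) :
    ∀ (l : List Int) (c : Int) (k : Nat), k < l.length →
      (pvPartials f c l).getD k 0 = c + ((l.take (k + 1)).map f).sum := by
  intro l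
  induction l with
  | nil => intro c k hk; simp at hk
  | cons p t ih =>
    intro c k hk
    cases k with
    | zero => simp [pvPartials]
    | succ k' =>
      have := ih (c + f p) k' (by simpa using hk)
      simp only [pvPartials, List.getD_cons_succ, List.take_succ_cons, List.map_cons,
        List.sum_cons] at this ⊢
      rw [this]; ring

-- The prefix-list fold, characterised: entry k (k ≤ length) is the sum over the first k entries.
lemma pv_prefix_getD (f : Int → Int) (l : List Int) :
    ∀ (k : Nat), k ≤ l.length →
      (l.foldl (fun pr p => pr ++ [pr.getD (pr.length - 1) 0 + f p]) [0]).getD k 0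
        = ((l.take k).map f).sum := by
  intro k hk
  rw [pv_fold_eq_partials f l [0] (by simp)]
  have hc : ([0] : List Int).getD (([0] : List Int).length - 1) 0 = (0 : Int) := rfl
  rw [hc]
  cases k with
  | zero => simp
  | succ k' =>
    have hk' : k' < l.length := by omega
    have := pv_partials_getD f l 0 k' hk'
    simpa using this

-- A's word_counts dict agrees with direct lookup-and-split on every key of the dict.
lemma pv_word_counts_getD (text : List (Int × String)) {p : Int}
    (hp : p ∈ (PySem.Dict.ofList text).keys) :
    ((PySem.Dict.ofList text).items.foldl
        (fun w pt => w.insert pt.1 ((PySem.Str.split₀ pt.2).length : Int)) PySem.Dict.empty).getD p 0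
      = ((PySem.Str.split₀ ((PySem.Dict.ofList text).getD p "")).length : Int) := by
  set d := PySem.Dict.ofList text with hd
  have hnd : d.keys.Nodup := PySem.Dict.nodup_keys_ofList text
  have hkeys : d.items.map (fun pt => pt.1) = d.keys := rfl
  have hfresh := PySem.Dict.items_foldl_insert_fresh d.items (fun pt => pt.1)
      (fun pt => ((PySem.Str.split₀ pt.2).length : Int)) PySem.Dict.empty
      (by intro a _; rfl) (by rw [hkeys]; exact hnd)
  set w := d.items.foldl (fun w pt => w.insert pt.1 ((PySem.Str.split₀ pt.2).length : Int))
      PySem.Dict.empty with hw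
  have hwitems : w.items = d.items.map (fun pt => (pt.1, ((PySem.Str.split₀ pt.2).length : Int))) := by
    rw [hw, hfresh]; rfl
  have hwkeys : w.keys.Nodup := by
    have : w.keys = d.keys := by
      show w.items.map (fun pt => pt.1) = d.keys
      rw [hwitems, ← hkeys, List.map_map]; rfl
    rw [this]; exact hnd
  have hmem : (p, d.getD p "") ∈ d.items := by
    rw [PySem.Dict.items_eq_map_keys d hnd ""]
    exact List.mem_map.mpr ⟨p, hp, rfl⟩
  have : (p, ((PySem.Str.split₀ (d.getD p "")).length : Int)) ∈ w.items := by
    rw [hwitems]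
    exact List.mem_map.mpr ⟨(p, d.getD p ""), hmem, rfl⟩
  exact PySem.Dict.getD_of_mem_items w this hwkeys 0

-- The core per-batch fact: on a sorted page list, the filtered sum over the batch window
-- equals the difference of two prefix sums located by binary search.
lemma pv_sum_filter_eq_prefix (f : Int → Int) (l : List Int) (hs : l.Pairwise (· ≤ ·))
    (s : Int) (eo : Option Int) :
    ((l.filter (fun p => decide (s ≤ p) && eo.all (fun e => decide (p < e)))).map f).sum
      = (if PySem.List.bisectLeft l s <
            (match eo with | none => l.length | some e => PySem.List.bisectLeft l e)
         then ((l.take (match eo with | none => l.length | some e => PySem.List.bisectLeft l e)).map f).sum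
              - ((l.take (PySem.List.bisectLeft l s)).map f).sum
         else 0) := by
  obtain ⟨hL0, hL1, hL2⟩ := PySem.List.bisectLeft_spec l s hs
  set L := PySem.List.bisectLeft l s with hLdef
  set H := (match eo with | none => l.length | some e => PySem.List.bisectLeft l e) with hHdef
  have hHlen : H ≤ l.length := by
    rw [hHdef]; cases eo with
    | none => simp
    | some e => exact (PySem.List.bisectLeft_spec l e hs).1
  have hfil : l.filter (fun p => decide (s ≤ p) && eo.all (fun e => decide (p < e)))
      = (l.take H).drop L := by
    apply pv_filter_eq_drop_take l L H
    intro j hj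
    cases eo with
    | none =>
      have hHe : H = l.length := hHdef
      simp only [Option.all_none, Bool.and_true, hHe, decide_eq_decide]
      constructor
      · intro hsle
        refine ⟨?_, hj⟩
        by_contra hc
        exact absurd hsle (by have := hL1 j hj (by omega); omega)
      · rintro ⟨hLj, _⟩; exact hL2 j hj hLj
    | some e =>
      obtain ⟨hH0, hH1, hH2⟩ := PySem.List.bisectLeft_spec l e hs
      have hHe : H = PySem.List.bisectLeft l e := hHdef
      simp only [Option.all_some, ← Bool.decide_and, hHe, decide_eq_decide]
      constructor
      · rintro ⟨hsle, hlt⟩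
        refine ⟨?_, ?_⟩
        · by_contra hc
          exact absurd hsle (by have := hL1 j hj (by omega); omega)
        · by_contra hc
          exact absurd hlt (by have := hH2 j hj (by omega); omega)
      · rintro ⟨hLj, hjH⟩
        exact ⟨hL2 j hj hLj, hH1 j hj hjH⟩
  rw [hfil]
  by_cases hLH : L < H
  · rw [if_pos hLH]
    have htake : l.take H = l.take L ++ (l.take H).drop L := by
      conv_lhs => rw [← List.take_append_drop L (l.take H)]
      rw [List.take_take, Nat.min_eq_left (by omega)]
    have hsum : ((l.take H).map f).sum
        = ((l.take L).map f).sum + (((l.take H).drop L).map f).sum := by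
      conv_lhs => rw [htake]
      rw [List.map_append, List.sum_append]
    omega
  · rw [if_neg hLH]
    have : (l.take H).drop L = [] := by
      apply List.drop_eq_nil_of_le
      simpa using (by omega : min H l.length ≤ L)
    simp [this]

-- ===== VERDICT (by name: the statement is the Claim_ definition above) =====
theorem get_batch_word_counts_spec : Claim_equal_get_batch_word_counts := by
  intro text bs _
  show get_batch_word_counts text bs = get_batch_word_counts_alt text bs
  unfold get_batch_word_counts get_batch_word_counts_alt
  simp only [PySem.List.foldl_append_singleton_eq_map, List.nil_append]
  apply List.map_congr_left
  intro ip hip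
  obtain ⟨k, hk, rfl⟩ := (PySem.List.mem_enumerate_iff bs 0 ip).1 hip
  simp only [zero_add]
  set d := PySem.Dict.ofList text with hd
  set pages := PySem.List.sorted (PySem.Dict.keys d) (fun x => x) with hpages
  have hpair : pages.Pairwise (· ≤ ·) := PySem.List.sorted_pairwise (PySem.Dict.keys d) (fun x => x)
  set wcf : Int → Int := fun p => ((PySem.Str.split₀ (d.getD p "")).length : Int) with hwcf
  set word_counts := d.items.foldl
      (fun w pt => w.insert pt.1 ((PySem.Str.split₀ pt.2).length : Int)) PySem.Dict.empty with hwc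
  -- A's inner loop is the sum of word counts over the filtered page list
  have hinner : ∀ (eo : Option Int),
      pages.foldl (fun s p =>
        if decide (bs[k] ≤ p) && eo.all (fun e => decide (p < e))
        then s + word_counts.getD p 0 else s) 0
      = ((pages.filter (fun p => decide (bs[k] ≤ p) && eo.all (fun e => decide (p < e)))).map wcf).sum := by
    intro eo
    rw [PySem.List.foldl_if_eq_foldl_filter _ (fun s p => s + word_counts.getD p 0),
      PySem.List.foldl_add _ (fun p => word_counts.getD p 0), zero_add]
    apply congrArg
    apply List.map_congr_left
    intro p hp
    have hpk : p ∈ (PySem.Dict.ofList text).keys :=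
      (PySem.List.sorted_perm (PySem.Dict.keys d) (fun x => x) false).mem_iff.mp
        (List.mem_of_mem_filter hp)
    exact pv_word_counts_getD text hpk
  by_cases hcase : k + 1 < bs.length
  · have hA : ((k : Int) + 1 < (bs.length : Int)) := by omega
    have hB : ¬ ((k : Int) + 1 = (bs.length : Int)) := by omega
    rw [if_pos hA, if_neg hB, hinner (some (PySem.List.pyGetD bs ((k : Int) + 1) 0)),
      pv_sum_filter_eq_prefix wcf pages hpair bs[k] (some (PySem.List.pyGetD bs ((k : Int) + 1) 0))]
    set e := PySem.List.pyGetD bs ((k : Int) + 1) 0 with he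
    have hlo := (PySem.List.bisectLeft_spec pages bs[k] hpair).1
    have hhi := (PySem.List.bisectLeft_spec pages e hpair).1
    rw [pv_prefix_getD wcf pages _ hhi, pv_prefix_getD wcf pages _ hlo]
  · have hA : ¬ ((k : Int) + 1 < (bs.length : Int)) := by omega
    have hB : ((k : Int) + 1 = (bs.length : Int)) := by omega
    rw [if_neg hA, if_pos hB, hinner none,
      pv_sum_filter_eq_prefix wcf pages hpair bs[k] none]
    have hlo := (PySem.List.bisectLeft_spec pages bs[k] hpair).1
    rw [pv_prefix_getD wcf pages _ le_rfl, pv_prefix_getD wcf pages _ hlo]
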